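-- pv_equiv track=rewrite | github.com/KBNLresearch/ochre | ochre/dbnl.py | get_repeated
-- ===== SOURCE A (Python) =====
-- from collections import Counter
--
-- def get_repeated(notes):
--     c = Counter()
--     num_lines = 0
--
--     for note in notes:
--         c[note] += 1
--
--     repeated = []
--     ns = []
--     for k, v in c.most_common():
--         if v > 1:
--             num_lines += v
--             repeated.append(k)
--         else:
--             ns.append(k)
--
--     return repeated
-- ===== SOURCE B (Python) =====
-- from collections import Counter
--
-- def get_repeated(notes):
--     c = Counter(notes)
--     buckets = {}
--     for k, v in c.items():
--         buckets.setdefault(v, []).append(k)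
--     out = []
--     for v in sorted(buckets, reverse=True):
--         if v > 1:
--             out.extend(buckets[v])
--     return out
-- ===== Notes on version B (the rewrite author's own statement) =====
-- stated objective: faster
-- what changed: B replaces Counter.most_common's global sort-then-filter with bucket grouping: keys are grouped into buckets by count in first-seen order, and the result is assembled by walking the distinct counts in descending order, keeping buckets with count > 1.
import Mathlib
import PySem

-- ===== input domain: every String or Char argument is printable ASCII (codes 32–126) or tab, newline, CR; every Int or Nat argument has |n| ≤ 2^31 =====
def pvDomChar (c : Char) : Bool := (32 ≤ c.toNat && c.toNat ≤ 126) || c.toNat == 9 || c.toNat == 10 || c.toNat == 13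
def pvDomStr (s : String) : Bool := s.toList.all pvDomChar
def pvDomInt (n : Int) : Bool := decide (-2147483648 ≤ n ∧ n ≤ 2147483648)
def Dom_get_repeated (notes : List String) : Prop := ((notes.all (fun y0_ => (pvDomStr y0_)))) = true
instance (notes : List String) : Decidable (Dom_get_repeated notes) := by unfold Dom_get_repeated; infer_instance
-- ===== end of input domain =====

-- B groups keys into buckets by their count and walks the distinct counts in descending
-- order, instead of A's global stable sort (most_common) followed by a filter; objective: alternative.

-- ===== PORT A =====
-- A: count with a Counter, walk most_common() (stable sort by count, reverse=True),
-- accumulate (num_lines, repeated, ns), return repeated.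
def get_repeated (notes : List String) : List String :=
  let c := notes.foldl (fun d note => d.modify note 0 (· + 1)) PySem.Dict.empty
  let r := (PySem.List.sorted c.items (fun p => p.2) true).foldl
      (fun (st : Int × List String × List String) p =>
        if 1 < p.2 then (st.1 + p.2, st.2.1 ++ [p.1], st.2.2)
        else (st.1, st.2.1, st.2.2 ++ [p.1]))
      (0, ([], []))
  r.2.1

-- ===== PORT B =====
-- B: Counter, then buckets[count] lists the keys with that count in first-seen order
-- (setdefault(v, []).append(k) is Dict.modify v [] (· ++ [k])); walk distinct counts descending.
def get_repeated_alt (notes : List String) : List String :=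
  let c := PySem.Dict.counter notes
  let buckets := c.items.foldl (fun d p => d.modify p.2 [] (· ++ [p.1])) PySem.Dict.empty
  (PySem.List.sorted buckets.keys (fun x => x) true).foldl
    (fun acc v => if 1 < v then acc ++ buckets.getD v [] else acc) []

-- ===== PRECONDITION & SPEC =====
def Spec_get_repeated (notes : List String) (out : List String) : Prop := out = get_repeated_alt notes
instance (notes : List String) (out : List String) : Decidable (Spec_get_repeated notes out) := by unfold Spec_get_repeated; infer_instance

-- ===== CLAIM (what is proved, stated in full; the proofs are below) =====
def Claim_equal_get_repeated : Prop := ∀ (notes : List String), Dom_get_repeated notes → Spec_get_repeated notes (get_repeated notes)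

-- ===== LEMMAS AND PROOFS =====

-- insertBy is "insert after the stable prefix": structural characterisation.
theorem pv_insertBy_eq {α : Type} (before : α → α → Bool) (x : α) (l : List α) :
    PySem.List.insertBy before x l
      = l.takeWhile (fun y => !before x y) ++ x :: l.dropWhile (fun y => !before x y) := by
  induction l with
  | nil => rfl
  | cons y ys ih =>
    show (if before x y then x :: y :: ys else y :: PySem.List.insertBy before x ys) = _
    by_cases h : before x y = true <;> simp [h, ih]

-- every element of the dropped suffix has key < key x (descending list)
theorem pv_dropWhile_key_lt {α : Type} (key : α → Int) (x : α) (l : List α)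
    (hl : l.Pairwise (fun a b => key b ≤ key a)) :
    ∀ z ∈ l.dropWhile (fun y => !decide (key y < key x)), key z < key x := by
  induction l with
  | nil => simp
  | cons y ys ih =>
    rw [List.pairwise_cons] at hl
    intro z hz
    rw [List.dropWhile_cons] at hz
    by_cases h : key y < key x
    · simp [h] at hz
      rcases hz with rfl | hz
      · exact h
      · exact lt_of_le_of_lt (hl.1 z hz) h
    · simp [h] at hz
      exact ih hl.2 z hz

-- inserting (reverse order) preserves the descending pairwise property
theorem pv_pairwise_insertBy {α : Type} (key : α → Int) (x : α) (l : List α)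
    (hl : l.Pairwise (fun a b => key b ≤ key a)) :
    (PySem.List.insertBy (fun a b => decide (key b < key a)) x l).Pairwise
      (fun a b => key b ≤ key a) := by
  rw [pv_insertBy_eq, List.pairwise_append]
  refine ⟨hl.sublist (List.takeWhile_sublist _), ?_, ?_⟩
  · rw [List.pairwise_cons]
    exact ⟨fun z hz => le_of_lt (pv_dropWhile_key_lt key x l hl z hz),
      hl.sublist (List.dropWhile_sublist _)⟩
  · intro a ha b hb
    have hax : ¬ key a < key x := by simpa using List.mem_takeWhile_imp ha
    rcases List.mem_cons.1 hb with rfl | hb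
    · exact le_of_not_gt hax
    · exact le_trans (le_of_lt (pv_dropWhile_key_lt key x l hl b hb)) (le_of_not_gt hax)

-- stability of one insertion: the filter at any key value grows only at its end
theorem pv_filter_insertBy {α : Type} (key : α → Int) (c : Int) (x : α) (l : List α)
    (hl : l.Pairwise (fun a b => key b ≤ key a)) :
    (PySem.List.insertBy (fun a b => decide (key b < key a)) x l).filter (fun a => key a == c)
      = l.filter (fun a => key a == c) ++ if key x == c then [x] else [] := by
  rw [pv_insertBy_eq, List.filter_append, List.filter_cons]
  conv_rhs => rw [← List.takeWhile_append_dropWhile (p := fun y => !decide (key y < key x)) (l := l)]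
  rw [List.filter_append]
  by_cases hc : (key x == c) = true
  · have hc' : key x = c := by simpa using hc
    have hdrop : (l.dropWhile (fun y => !decide (key y < key x))).filter (fun a => key a == c) = [] := by
      rw [List.filter_eq_nil_iff]
      intro z hz
      have := pv_dropWhile_key_lt key x l hl z hz
      simp
      omega
    simp [hc, hdrop]
  · simp [hc]

-- stability of the whole insertion fold
theorem pv_filter_foldl_insertBy {α : Type} (key : α → Int) (c : Int) :
    ∀ (l acc : List α), acc.Pairwise (fun a b => key b ≤ key a) →
    ((l.foldl (fun a x => PySem.List.insertBy (fun a b => decide (key b < key a)) x a) acc).filter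
        (fun a => key a == c))
      = acc.filter (fun a => key a == c) ++ (l.filter (fun a => key a == c)) := by
  intro l
  induction l with
  | nil => intro acc _; simp
  | cons x xs ih =>
    intro acc hacc
    rw [List.foldl_cons, ih _ (pv_pairwise_insertBy key x acc hacc),
      pv_filter_insertBy key c x acc hacc, List.filter_cons]
    by_cases hc : (key x == c) = true <;> simp [hc]

-- STABILITY: sorted(_, key, reverse=True) keeps the relative order of equal keys
theorem pv_sorted_rev_filter {α : Type} (key : α → Int) (xs : List α) (c : Int) :
    (PySem.List.sorted xs key true).filter (fun a => key a == c)
      = xs.filter (fun a => key a == c) := by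
  rw [PySem.List.sorted_rev_eq_foldl_insertBy]
  simpa using pv_filter_foldl_insertBy key c xs [] (by simp)

-- uniqueness: a descending list is determined by its filters at each key value
theorem pv_desc_filter_ext {α : Type} (key : α → Int) :
    ∀ (L1 L2 : List α), L1.Pairwise (fun a b => key b ≤ key a) →
      L2.Pairwise (fun a b => key b ≤ key a) →
      (∀ c, L1.filter (fun a => key a == c) = L2.filter (fun a => key a == c)) →
      L1 = L2 := by
  intro L1
  induction L1 with
  | nil =>
    intro L2 _ _ hf
    cases L2 with
    | nil => rfl
    | cons b t2 =>
      exfalso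
      have := hf (key b)
      rw [List.filter_cons] at this
      simp at this
  | cons a t1 ih =>
    intro L2 h1 h2 hf
    cases L2 with
    | nil =>
      exfalso
      have := hf (key a)
      rw [List.filter_cons] at this
      simp at this
    | cons b t2 =>
      rw [List.pairwise_cons] at h1 h2
      have hne1 : ¬ key a < key b := by
        intro hlt
        have h := hf (key b)
        rw [List.filter_cons, List.filter_cons] at h
        have ht1 : t1.filter (fun x => key x == key b) = [] := by
          rw [List.filter_eq_nil_iff]
          intro z hz
          have := h1.1 z hz
          simp
          omega
        have hab : ¬ (key a == key b) = true := by simp; omega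
        simp [ht1, hab] at h
      have hne2 : ¬ key b < key a := by
        intro hlt
        have h := hf (key a)
        rw [List.filter_cons, List.filter_cons] at h
        have ht2 : t2.filter (fun x => key x == key a) = [] := by
          rw [List.filter_eq_nil_iff]
          intro z hz
          have := h2.1 z hz
          simp
          omega
        have hba : ¬ (key b == key a) = true := by simp; omega
        simp [ht2, hba] at h
      have hab : key a = key b := le_antisymm (le_of_not_gt hne2) (le_of_not_gt hne1)
      have hhead := hf (key a)
      rw [List.filter_cons, List.filter_cons] at hhead
      simp [hab] at hhead
      obtain ⟨rfl, htail⟩ := hhead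
      have htails : ∀ c, t1.filter (fun x => key x == c) = t2.filter (fun x => key x == c) := by
        intro c
        by_cases hc : key a = c
        · subst hc; exact htail
        · have h := hf c
          rw [List.filter_cons, List.filter_cons] at h
          have : ¬ (key a == c) = true := by simpa using hc
          simpa [this, hab] using h
      rw [ih t2 h1.2 h2.2 htails]

-- key of an element of the bucket concatenation is one of the listed counts
theorem pv_key_mem_flatMap {α : Type} (key : α → Int) (xs : List α) (C : List Int) (b : α)
    (hb : b ∈ C.flatMap (fun c => xs.filter (fun a => key a == c))) : key b ∈ C := by
  simp only [List.mem_flatMap] at hb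
  obtain ⟨c, hc, hbc⟩ := hb
  have h := List.of_mem_filter hbc
  simp at h
  rwa [h]

-- the bucket concatenation is descending when the counts are strictly descending
theorem pv_flatMap_pairwise {α : Type} (key : α → Int) (xs : List α) :
    ∀ (C : List Int), C.Pairwise (fun a b => b < a) →
    (C.flatMap (fun c => xs.filter (fun a => key a == c))).Pairwise
      (fun a b => key b ≤ key a) := by
  intro C
  induction C with
  | nil => simp
  | cons c C' ih =>
    intro hC
    rw [List.pairwise_cons] at hC
    rw [List.flatMap_cons, List.pairwise_append]
    refine ⟨?_, ih hC.2, ?_⟩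
    · apply List.pairwise_of_forall_mem_list
      intro a ha b hb
      have hka : key a = c := by simpa using List.of_mem_filter ha
      have hkb : key b = c := by simpa using List.of_mem_filter hb
      omega
    · intro a ha b hb
      have hka : key a = c := by simpa using List.of_mem_filter ha
      have hkb : key b ∈ C' := pv_key_mem_flatMap key xs C' b hb
      have := hC.1 _ hkb
      omega

-- filter of the bucket concatenation, for a duplicate-free count list
theorem pv_flatMap_filter {α : Type} (key : α → Int) (xs : List α) (c' : Int) :
    ∀ (C : List Int), C.Nodup →
    ((C.flatMap (fun c => xs.filter (fun a => key a == c))).filter (fun a => key a == c'))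
      = if c' ∈ C then xs.filter (fun a => key a == c') else [] := by
  intro C
  induction C with
  | nil => simp
  | cons c C' ih =>
    intro hnd
    rw [List.nodup_cons] at hnd
    rw [List.flatMap_cons, List.filter_append, List.filter_filter, ih hnd.2]
    by_cases hcc : c = c'
    · have h1 : (fun a => (key a == c') && (key a == c)) = (fun a => key a == c') := by
        funext a; by_cases h : (key a == c') = true <;> simp [h, hcc]
      have hm' : c' ∉ C' := by rw [← hcc]; exact hnd.1
      simp [h1, hcc, hm']
    · have h1 : ∀ a : α, ((key a == c') && (key a == c)) = false := by
        intro a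
        by_cases h : key a = c
        · simp [h]; exact hcc
        · simp [h]
      simp only [h1]
      by_cases hm : c' ∈ C' <;> simp [hm, Ne.symm hcc]

-- MAIN: a stable descending sort is the concatenation of count buckets over the
-- strictly descending list of distinct key values
theorem pv_sorted_eq_flatMap {α : Type} [BEq α] [LawfulBEq α] (key : α → Int) (xs : List α) :
    PySem.List.sorted xs key true
      = (PySem.List.sorted (PySem.Set.ofList (xs.map key)) (fun x => x) true).flatMap
          (fun c => xs.filter (fun a => key a == c)) := by
  set C := PySem.List.sorted (PySem.Set.ofList (xs.map key)) (fun x => x) true with hCdef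
  have hCnd : C.Nodup :=
    (PySem.List.sorted_perm _ _ _).symm.nodup (PySem.Set.nodup_ofList _)
  have hCgt : C.Pairwise (fun a b => b < a) := by
    have h1 : C.Pairwise (fun a b : Int => b ≤ a) := by
      simpa using PySem.List.sorted_pairwise_rev (PySem.Set.ofList (xs.map key)) (fun x => x)
    exact List.Pairwise.imp₂ (fun a b h hne => lt_of_le_of_ne h (Ne.symm hne)) h1 hCnd
  have hCmem : ∀ c : Int, c ∈ C ↔ c ∈ xs.map key := by
    intro c
    rw [hCdef, PySem.List.mem_sorted, PySem.Set.mem_ofList]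
  apply pv_desc_filter_ext key
  · exact PySem.List.sorted_pairwise_rev xs key
  · exact pv_flatMap_pairwise key xs C hCgt
  · intro c
    rw [pv_sorted_rev_filter, pv_flatMap_filter key xs c C hCnd]
    by_cases hm : c ∈ C
    · simp [hm]
    · have hnone : xs.filter (fun a => key a == c) = [] := by
        rw [List.filter_eq_nil_iff]
        intro z hz hkz
        apply hm
        rw [hCmem]
        exact List.mem_map.2 ⟨z, hz, by simpa using hkz⟩
      simp [hm, hnone]

-- A's accumulation loop returns repeated = first components of the pairs with count > 1
theorem pv_foldA :
    ∀ (l : List (String × Int)) (st : Int × List String × List String),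
    ((l.foldl (fun (st : Int × List String × List String) p =>
        if 1 < p.2 then (st.1 + p.2, st.2.1 ++ [p.1], st.2.2)
        else (st.1, st.2.1, st.2.2 ++ [p.1])) st).2.1)
      = st.2.1 ++ (l.filter (fun p => decide (1 < p.2))).map (fun p => p.1) := by
  intro l
  induction l with
  | nil => intro st; simp
  | cons p ps ih =>
    intro st
    rw [List.foldl_cons, List.filter_cons]
    by_cases h : 1 < p.2
    · simp only [h, if_pos, decide_eq_true h, ih]
      simp
    · simp only [h, if_neg h, decide_eq_false h, ih]
      simp [h]

-- filtering a bucket by `count > 1` keeps or drops the whole bucket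
theorem pv_filter_bucket {α : Type} (key : α → Int) (xs : List α) (c : Int) :
    (xs.filter (fun a => key a == c)).filter (fun a => decide (1 < key a))
      = if 1 < c then xs.filter (fun a => key a == c) else [] := by
  rw [List.filter_filter]
  have h : (fun a => decide (1 < key a) && (key a == c))
      = (fun a => decide (1 < c) && (key a == c)) := by
    funext a
    by_cases hk : key a = c
    · simp [hk]
    · have hk' : (key a == c) = false := by simp [hk]
      rw [hk', Bool.and_false, Bool.and_false]
  rw [h]
  by_cases hc : 1 < c
  · simp only [decide_eq_true hc, Bool.true_and, if_pos hc]
  · simp only [decide_eq_false hc, Bool.false_and, List.filter_false, if_neg hc]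

-- B's buckets dictionary: lookup is the keys of the pairs with that count, in order
theorem pv_buckets_getD (items : List (String × Int)) (v : Int) :
    ((items.foldl (fun d p => d.modify p.2 [] (· ++ [p.1])) PySem.Dict.empty).getD v [])
      = (items.filter (fun p => p.2 == v)).map (fun p => p.1) := by
  have h : items.foldl (fun d p => d.modify p.2 [] (· ++ [p.1])) PySem.Dict.empty
      = (items.map (fun p => (p.2, p.1))).foldl
          (fun d q => d.modify q.1 [] (· ++ [q.2])) PySem.Dict.empty := by
    rw [List.foldl_map]
  rw [h, PySem.Dict.getD_foldl_modify_append, List.filter_map]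
  simp [Function.comp_def, List.map_map]

-- B's buckets dictionary: its keys are the distinct counts in first-seen order
theorem pv_buckets_keys (items : List (String × Int)) :
    ((items.foldl (fun d p => d.modify p.2 [] (· ++ [p.1])) PySem.Dict.empty).keys)
      = PySem.Set.ofList (items.map (fun p => p.2)) := by
  rw [PySem.Dict.keys_foldl_modify_key items (fun p => p.2) [] (fun d p l => l ++ [p.1])]
  rfl

-- ===== VERDICT (by name: the statement is the Claim_ definition above) =====
theorem get_repeated_spec : Claim_equal_get_repeated := by
  intro notes _
  unfold Spec_get_repeated get_repeated get_repeated_alt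
  dsimp only
  rw [← PySem.Dict.counter_eq_foldl]
  set items := (PySem.Dict.counter notes).items with hitems
  rw [pv_foldA, pv_buckets_keys]
  rw [pv_sorted_eq_flatMap (fun p => p.2) items]
  rw [List.filter_flatMap, List.map_flatMap]
  have hB : ∀ (C : List Int),
      C.foldl (fun acc v => if 1 < v then
          acc ++ ((items.foldl (fun d p => d.modify p.2 [] (· ++ [p.1])) PySem.Dict.empty).getD v [])
        else acc) []
      = C.flatMap (fun v => if 1 < v then (items.filter (fun p => p.2 == v)).map (fun p => p.1) else []) := by
    intro C
    have hfun : (fun (acc : List String) v => if 1 < v then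
          acc ++ ((items.foldl (fun d p => d.modify p.2 [] (· ++ [p.1])) PySem.Dict.empty).getD v [])
        else acc)
        = (fun acc v => acc ++ if 1 < v then (items.filter (fun p => p.2 == v)).map (fun p => p.1) else []) := by
      funext acc v
      by_cases h : 1 < v
      · simp [h, pv_buckets_getD]
      · simp [h]
    rw [hfun, PySem.List.foldl_append_eq_flatMap]
    simp
  rw [hB]
  dsimp only
  rw [List.nil_append]
  congr 1
  funext c
  rw [pv_filter_bucket (fun p => p.2) items c]
  by_cases h : 1 < c
  · simp [h]
  · simp [h]
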